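-- pv_equiv track=rewrite | github.com/parkhae/pystudy | 요셉/lv0/배열 비교하기(요셉).py | solution
-- ===== SOURCE A (Python) =====
-- def solution(arr, n):
--     answer = []
--     if len(arr)/2 == int(len(arr)/2):
--         for i in range(len(arr)):
--             if i/2 == int(i/2):
--                 answer.append(arr[i])
--             else: answer.append(arr[i]+n)
--     else:
--         for i in range(len(arr)):
--             if i/2 == int(i/2):
--                 answer.append(arr[i]+n)
--             else: answer.append(arr[i])
--     return answer
-- ===== SOURCE B (Python) =====
-- def solution(arr, n):
--     start = 1 if len(arr) % 2 == 0 else 0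
--     answer = list(arr)
--     answer[start::2] = [x + n for x in answer[start::2]]
--     return answer
-- ===== Notes on version B (the rewrite author's own statement) =====
-- stated objective: simpler
-- what changed: Replaces the even/odd-length branch with two per-index parity-tested append loops by copying the input and one strided slice assignment answer[start::2] = [x+n ...], where start encodes the length parity.
import Mathlib
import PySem

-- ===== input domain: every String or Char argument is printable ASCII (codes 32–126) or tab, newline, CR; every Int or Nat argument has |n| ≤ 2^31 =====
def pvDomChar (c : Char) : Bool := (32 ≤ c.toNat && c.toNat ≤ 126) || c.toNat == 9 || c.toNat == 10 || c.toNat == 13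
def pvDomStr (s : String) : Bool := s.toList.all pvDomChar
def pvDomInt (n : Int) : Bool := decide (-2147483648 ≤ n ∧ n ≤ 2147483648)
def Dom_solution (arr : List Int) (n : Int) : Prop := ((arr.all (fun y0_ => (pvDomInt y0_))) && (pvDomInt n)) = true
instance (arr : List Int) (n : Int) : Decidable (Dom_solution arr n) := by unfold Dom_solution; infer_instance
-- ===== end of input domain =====

-- B replaces A's even/odd-length branch with two parity-tested append loops by one
-- strided slice assignment on a copy of the input (objective: simpler).

-- ===== PORT A =====
-- 'len(arr)/2 == int(len(arr)/2)' and 'i/2 == int(i/2)' test evenness of a nonnegative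
-- machine-size int; exact as '% 2 == 0' here since lengths/indices are nonnegative and far below 2^52.
def solution (arr : List Int) (n : Int) : List Int :=
  if (arr.length : Int) % 2 == 0 then
    (PySem.List.pyRange 0 arr.length 1).foldl
      (fun answer i =>
        if i % 2 == 0 then answer ++ [PySem.List.pyGetD arr i 0]
        else answer ++ [PySem.List.pyGetD arr i 0 + n]) []
  else
    (PySem.List.pyRange 0 arr.length 1).foldl
      (fun answer i =>
        if i % 2 == 0 then answer ++ [PySem.List.pyGetD arr i 0 + n]
        else answer ++ [PySem.List.pyGetD arr i 0]) []

-- ===== PORT B =====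
-- answer[start::2] read: every second element starting at the front of the suffix
def strideGet : List Int → List Int
  | [] => []
  | [x] => [x]
  | x :: _ :: t => x :: strideGet t

-- answer[start::2] = vs write: put vs back at those positions (the RHS has exactly the slice's length here)
def strideSet : List Int → List Int → List Int
  | xs, [] => xs
  | [], _ :: _ => []
  | [_], v :: _ => [v]
  | _ :: y :: t, v :: vs => v :: y :: strideSet t vs

def solution_alt (arr : List Int) (n : Int) : List Int :=
  let start : Nat := if (arr.length : Int) % 2 == 0 then 1 else 0
  let answer := arr
  answer.take start ++ strideSet (answer.drop start) ((strideGet (answer.drop start)).map (· + n))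

-- ===== PRECONDITION & SPEC =====
def Spec_solution (arr : List Int) (n : Int) (out : List Int) : Prop := out = solution_alt arr n
instance (arr : List Int) (n : Int) (out : List Int) : Decidable (Spec_solution arr n out) := by unfold Spec_solution; infer_instance

-- ===== CLAIM (what is proved, stated in full; the proofs are below) =====
def Claim_equal_solution : Prop := ∀ (arr : List Int) (n : Int), Dom_solution arr n → Spec_solution arr n (solution arr n)

-- ===== LEMMAS AND PROOFS =====

-- writing back the mapped slice f-maps exactly the even-offset elements
def mapEven (f : Int → Int) : List Int → List Int
  | [] => []
  | [x] => [f x]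
  | x :: y :: t => f x :: y :: mapEven f t

theorem strideSet_strideGet_map (f : Int → Int) (xs : List Int) :
    strideSet xs ((strideGet xs).map f) = mapEven f xs := by
  induction xs using strideGet.induct with
  | case1 => simp [strideGet, strideSet, mapEven]
  | case2 x => simp [strideGet, strideSet, mapEven]
  | case3 x y t ih => simp [strideGet, strideSet, mapEven, ih]

theorem length_mapEven (f : Int → Int) (xs : List Int) :
    (mapEven f xs).length = xs.length := by
  induction xs using strideGet.induct with
  | case1 => rfl
  | case2 x => rfl
  | case3 x y t ih => simp [mapEven, ih]

theorem getElem_mapEven (f : Int → Int) (xs : List Int) :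
    ∀ (j : Nat) (hj : j < xs.length),
      (mapEven f xs)[j]'(by rw [length_mapEven]; exact hj)
        = if j % 2 = 0 then f xs[j] else xs[j] := by
  induction xs using strideGet.induct with
  | case1 => intro j hj; simp at hj
  | case2 x =>
      intro j hj
      have h0 : j = 0 := by simp at hj; omega
      subst h0
      simp [mapEven]
  | case3 x y t ih =>
      intro j hj
      match j with
      | 0 => simp [mapEven]
      | 1 => simp [mapEven]
      | (k + 2) =>
          have hk : k < t.length := by simpa using hj
          have := ih k hk
          simpa [mapEven, Nat.add_mod_right] using this

theorem getElem?_mapEven (f : Int → Int) (xs : List Int) (j : Nat) (hj : j < xs.length) :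
    (mapEven f xs)[j]? = some (if j % 2 = 0 then f xs[j] else xs[j]) := by
  rw [List.getElem?_eq_getElem (by rw [length_mapEven]; exact hj)]
  rw [getElem_mapEven f xs j hj]

theorem foldl_if_append (l : List Int) (c : Int → Bool) (u v : Int → Int) (acc : List Int) :
    l.foldl (fun answer i => if c i then answer ++ [u i] else answer ++ [v i]) acc
      = acc ++ l.map (fun i => if c i then u i else v i) := by
  have h : (fun (answer : List Int) i => if c i then answer ++ [u i] else answer ++ [v i])
      = (fun answer i => answer ++ [if c i then u i else v i]) := by
    funext answer i; split <;> rfl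
  rw [h, PySem.List.foldl_append_singleton_eq_map]

theorem length_solution (arr : List Int) (n : Int) :
    (solution arr n).length = arr.length := by
  unfold solution
  split <;> rw [foldl_if_append] <;> simp [PySem.List.length_pyRange_one]

theorem length_solution_alt (arr : List Int) (n : Int) :
    (solution_alt arr n).length = arr.length := by
  unfold solution_alt
  simp only [strideSet_strideGet_map]
  split <;> simp [length_mapEven] <;> omega

theorem parity_cast (k : Nat) : ((k : Int) % 2 == 0) = decide (k % 2 = 0) := by
  rcases Nat.mod_two_eq_zero_or_one k with h | h <;> simp [h] <;> omega

-- A's output, pointwise: add n exactly where the index parity differs from the length parity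
theorem solution_getElem? (arr : List Int) (n : Int) (k : Nat) (hk : k < arr.length) :
    (solution arr n)[k]? = some (if k % 2 = arr.length % 2 then arr[k] else arr[k] + n) := by
  have hget : PySem.List.pyGetD arr (k : Int) 0 = arr[k] := by
    rw [PySem.List.pyGetD_eq_getElem arr 0 (by positivity) (by exact_mod_cast hk)]
    simp
  unfold solution
  by_cases hc : ((arr.length : Int) % 2 == 0) = true
  · rw [if_pos hc, foldl_if_append]
    simp only [List.nil_append]
    rw [PySem.List.getElem?_map_pyRange_zero _ arr.length k hk]
    have he : arr.length % 2 = 0 := by simp at hc; omega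
    rw [parity_cast, hget]
    rcases Nat.mod_two_eq_zero_or_one k with hko | hko <;> simp [hko, he]
  · rw [if_neg hc, foldl_if_append]
    simp only [List.nil_append]
    rw [PySem.List.getElem?_map_pyRange_zero _ arr.length k hk]
    have he : arr.length % 2 = 1 := by simp at hc; omega
    rw [parity_cast, hget]
    rcases Nat.mod_two_eq_zero_or_one k with hko | hko <;> simp [hko, he]

-- B's output, pointwise: the same alternation
theorem solution_alt_getElem? (arr : List Int) (n : Int) (k : Nat) (hk : k < arr.length) :
    (solution_alt arr n)[k]? = some (if k % 2 = arr.length % 2 then arr[k] else arr[k] + n) := by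
  unfold solution_alt
  simp only [strideSet_strideGet_map]
  by_cases hc : ((arr.length : Int) % 2 == 0) = true
  · have he : arr.length % 2 = 0 := by simp at hc; omega
    rw [if_pos hc]
    match arr, hk with
    | x :: t, hk =>
      simp only [List.take_succ_cons, List.take_zero, List.drop_succ_cons, List.drop_zero]
      have ht : t.length % 2 = 1 := by simp at he ⊢; omega
      match k with
      | 0 =>
          simp only [List.length_cons] at he
          simp [he]
      | (j + 1) =>
          have hj : j < t.length := by simpa using hk
          rw [List.getElem?_append_right (by simp)]
          simp only [List.length_cons, List.length_nil, Nat.zero_add, Nat.add_sub_cancel]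
          rw [getElem?_mapEven (· + n) t j hj]
          simp only [List.getElem_cons_succ]
          simp only [List.length_cons] at he
          by_cases hj2 : j % 2 = 0
          · rw [if_pos hj2, if_neg (by omega)]
          · rw [if_neg hj2, if_pos (by omega)]
  · have he : arr.length % 2 = 1 := by simp at hc; omega
    rw [if_neg hc]
    simp only [List.take_zero, List.drop_zero, List.nil_append]
    rw [getElem?_mapEven (· + n) arr k hk]
    by_cases hk2 : k % 2 = 0
    · rw [if_pos hk2, if_neg (by omega)]
    · rw [if_neg hk2, if_pos (by omega)]

-- ===== VERDICT (by name: the statement is the Claim_ definition above) =====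
theorem solution_spec : Claim_equal_solution := by
  intro arr n _
  unfold Spec_solution
  apply List.ext_getElem?
  intro k
  by_cases hk : k < arr.length
  · rw [solution_getElem? arr n k hk, solution_alt_getElem? arr n k hk]
  · rw [List.getElem?_eq_none (by rw [length_solution]; omega),
        List.getElem?_eq_none (by rw [length_solution_alt]; omega)]
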